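-- pv_equiv track=rewrite | github.com/bncolorado/adsoScansionSystem | analysis/modules/AnalizadorSinalefas/PorReglas/sinalefaReglas.py | sineresisAtonas
-- ===== SOURCE A (Python) =====
-- def sineresisAtonas(verso, sinlalefPorResolver):
--         indice = int()
--         salida = ''
--         for item in verso:
--             if item == u'-' and indice < (len(verso)-1):
--                 if verso[indice-1] in 'haeiou,;.:' and verso[indice+1] in 'aeiouh':
--                     if sinlalefPorResolver > 0:
--                         salida += u'_'
--                         sinlalefPorResolver = sinlalefPorResolver-1
-- #					print sinlalefPorResolver
--                     else:
--                         salida += item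
--                 else:
--                     salida += item
--             else:
--                 salida += item
--             indice += 1
--         return salida, sinlalefPorResolver
-- ===== SOURCE B (Python) =====
-- def sineresisAtonas(verso, sinlalefPorResolver):
--     n = len(verso)
--     cands = [i for i in range(n - 1)
--              if verso[i] == '-' and verso[i - 1] in 'haeiou,;.:' and verso[i + 1] in 'aeiouh']
--     take = min(len(cands), sinlalefPorResolver) if sinlalefPorResolver > 0 else 0
--     convert = set(cands[:take])
--     salida = ''.join('_' if i in convert else c for i, c in enumerate(verso))
--     return salida, sinlalefPorResolver - take
-- ===== Notes on version B (the rewrite author's own statement) =====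
-- stated objective: alternative
-- what changed: A threads a mutable (index, output, budget) state through one character loop with nested branches; B first collects the list of candidate hyphen positions, keeps the first min(count, budget) of them, and then rebuilds the string by position membership, returning budget minus the number converted.
import Mathlib
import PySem

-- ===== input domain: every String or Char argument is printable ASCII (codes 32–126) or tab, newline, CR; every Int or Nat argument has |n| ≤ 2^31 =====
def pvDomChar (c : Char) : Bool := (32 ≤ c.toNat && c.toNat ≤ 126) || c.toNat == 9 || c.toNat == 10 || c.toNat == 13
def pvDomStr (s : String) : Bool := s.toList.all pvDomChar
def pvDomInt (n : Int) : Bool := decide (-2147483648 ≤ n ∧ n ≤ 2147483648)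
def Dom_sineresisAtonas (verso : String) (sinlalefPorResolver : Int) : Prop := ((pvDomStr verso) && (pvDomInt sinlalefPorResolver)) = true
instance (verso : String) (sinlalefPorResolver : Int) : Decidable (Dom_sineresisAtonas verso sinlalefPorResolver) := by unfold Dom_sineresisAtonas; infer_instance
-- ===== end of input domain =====

-- B replaces A's stateful left-to-right scan (index/budget/output accumulator) by a candidate-list
-- decomposition: collect candidate indices, keep the first min(count, budget) of them, rebuild the
-- string by position membership. Same return value; objective: alternative decomposition, not faster.

-- ===== PORT A =====
-- A-side helper: the body of A's for-loop (one fold step); state = (indice, salida, sinlalefPorResolver).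
def sineresisAtonasStep (cs : List Char) (st : Int × List Char × Int) (item : Char) : Int × List Char × Int :=
  let indice := st.1
  let salida := st.2.1
  let k := st.2.2
  if item == '-' && decide (indice < (cs.length : Int) - 1) then
    if ((PySem.List.pyGet? cs (indice - 1)).any fun c => "haeiou,;.:".toList.contains c) &&
       ((PySem.List.pyGet? cs (indice + 1)).any fun c => "aeiouh".toList.contains c) then
      if k > 0 then (indice + 1, salida ++ ['_'], k - 1)
      else (indice + 1, salida ++ [item], k)
    else (indice + 1, salida ++ [item], k)
  else (indice + 1, salida ++ [item], k)

def sineresisAtonas (verso : String) (sinlalefPorResolver : Int) : String × Int :=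
  let cs := verso.toList
  let r := cs.foldl (sineresisAtonasStep cs) (0, [], sinlalefPorResolver)
  (String.ofList r.2.1, r.2.2)

-- ===== PORT B =====
def sineresisAtonas_alt (verso : String) (sinlalefPorResolver : Int) : String × Int :=
  let cs := verso.toList
  let n := cs.length
  let cands := (PySem.List.pyRange 0 ((n : Int) - 1) 1).filter (fun i =>
      (PySem.List.pyGet? cs i == some '-') &&
      ((PySem.List.pyGet? cs (i - 1)).any fun c => "haeiou,;.:".toList.contains c) &&
      ((PySem.List.pyGet? cs (i + 1)).any fun c => "aeiouh".toList.contains c))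
  let take : Int := if sinlalefPorResolver > 0 then min (cands.length : Int) sinlalefPorResolver else 0
  let convert := PySem.List.slice cands none (some take)
  let salida := (PySem.List.enumerate cs).map (fun p => if convert.contains p.1 then '_' else p.2)
  (String.ofList salida, sinlalefPorResolver - take)

-- ===== PRECONDITION & SPEC =====
def Spec_sineresisAtonas (verso : String) (sinlalefPorResolver : Int) (out : String × Int) : Prop := out = sineresisAtonas_alt verso sinlalefPorResolver
instance (verso : String) (sinlalefPorResolver : Int) (out : String × Int) : Decidable (Spec_sineresisAtonas verso sinlalefPorResolver out) := by unfold Spec_sineresisAtonas; infer_instance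

-- ===== CLAIM (what is proved, stated in full; the proofs are below) =====
def Claim_equal_sineresisAtonas : Prop := ∀ (verso : String) (sinlalefPorResolver : Int), Dom_sineresisAtonas verso sinlalefPorResolver → Spec_sineresisAtonas verso sinlalefPorResolver (sineresisAtonas verso sinlalefPorResolver)

-- ===== LEMMAS AND PROOFS =====

-- the condition under which position i of cs is a sinalefa candidate (A's three tests combined)
def pvCond (cs : List Char) (i : ℕ) : Bool :=
  decide ((i : Int) < (cs.length : Int) - 1) && (cs[i]? == some '-') &&
  ((PySem.List.pyGet? cs ((i : Int) - 1)).any fun c => "haeiou,;.:".toList.contains c) &&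
  ((PySem.List.pyGet? cs ((i : Int) + 1)).any fun c => "aeiouh".toList.contains c)

-- number of candidate positions in [a, b)
def pvCnt (cs : List Char) (a b : ℕ) : ℕ := (List.range' a (b - a)).countP (pvCond cs)

theorem pvCnt_succ_left (cs : List Char) (a b : ℕ) (h : a < b) :
    pvCnt cs a b = (if pvCond cs a then 1 else 0) + pvCnt cs (a+1) b := by
  unfold pvCnt
  have : b - a = (b - (a+1)) + 1 := by omega
  rw [this, List.range'_succ, List.countP_cons]
  simp [pvCond]
  omega

theorem pvFoldA (cs : List Char) (i : ℕ) (hi : i ≤ cs.length) (sal : List Char) (k : Int) :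
    (cs.drop i).foldl (sineresisAtonasStep cs) ((i : Int), sal, k)
    = ((cs.length : Int),
       sal ++ (List.range' i (cs.length - i)).map
         (fun j => if pvCond cs j && decide ((pvCnt cs i j : Int) < k) then '_' else cs.getD j ' '),
       k - (if 0 < k then min ((pvCnt cs i cs.length : ℕ) : Int) k else 0)) := by
  by_cases hlt : i < cs.length
  · have hdrop : cs.drop i = cs[i] :: cs.drop (i+1) := List.drop_eq_getElem_cons hlt
    rw [hdrop, List.foldl_cons]
    have hstep : sineresisAtonasStep cs ((i : Int), sal, k) cs[i]
        = ((i : Int) + 1,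
           sal ++ [if pvCond cs i && decide (0 < k) then '_' else cs[i]],
           if pvCond cs i && decide (0 < k) then k - 1 else k) := by
      unfold sineresisAtonasStep pvCond
      have : cs[i]? = some cs[i] := List.getElem?_eq_getElem hlt
      by_cases h1 : cs[i] = '-' <;> by_cases h2 : (i : Int) < (cs.length : Int) - 1 <;>
        simp [this, h1, h2] <;> split_ifs <;> simp_all
    rw [hstep]
    have hcast : ((i : Int) + 1) = ((i + 1 : ℕ) : Int) := by push_cast; ring
    rw [hcast, pvFoldA cs (i+1) (by omega) _ _]
    have hsplit : cs.length - i = (cs.length - (i+1)) + 1 := by omega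
    have hrange : List.range' i (cs.length - i) = i :: List.range' (i+1) (cs.length - (i+1)) := by
      rw [hsplit, List.range'_succ]
    have hcnt0 : pvCnt cs i i = 0 := by simp [pvCnt]
    have hcntn := pvCnt_succ_left cs i cs.length hlt
    refine Prod.ext rfl (Prod.ext ?_ ?_)
    · show sal ++ [_] ++ _ = sal ++ _
      rw [hrange, List.map_cons, List.append_assoc, List.singleton_append]
      congr 1
      congr 1
      · simp [hcnt0, List.getElem?_eq_getElem hlt]
      · apply List.map_congr_left
        intro j hj
        have hij : i + 1 ≤ j := (List.mem_range'_1.mp hj).1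
        have hcj := pvCnt_succ_left cs i j (by omega)
        by_cases hc : pvCond cs i = true <;> simp only [hc, if_true, if_false, Bool.false_eq_true] at hcj <;>
          by_cases hk : 0 < k <;> by_cases hcondj : pvCond cs j = true <;>
          simp only [hc, hk, hcondj, Bool.true_and, Bool.false_and, decide_true, decide_false,
            Bool.and_true, Bool.and_false, if_false, Bool.false_eq_true, decide_eq_true_eq] <;>
          split_ifs <;> first | rfl | (exfalso; omega)
    · show (if pvCond cs i && decide (0 < k) then k - 1 else k) - _ = _
      by_cases hc : pvCond cs i = true <;> by_cases hk : 0 < k <;>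
        simp [hc, hk, hcntn] <;> split_ifs <;> push_cast <;> omega
  · have hin : i = cs.length := by omega
    subst hin
    simp [pvCnt]
    split_ifs with h
    · omega
    · ring
termination_by cs.length - i

theorem pvTakeFilterRange (p : ℕ → Bool) (m t j : ℕ) :
    j ∈ ((List.range m).filter p).take t ↔
      j < m ∧ p j = true ∧ (List.range j).countP p < t := by
  induction m with
  | zero => simp
  | succ m ih =>
    have hlen : ((List.range m).filter p).length = (List.range m).countP p :=
      Eq.symm List.countP_eq_length_filter
    rw [List.range_succ, List.filter_append, List.take_append, List.mem_append]
    by_cases hp : p m = true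
    · have hfm : List.filter p [m] = [m] := by simp [hp]
      rw [hfm]
      have hsingle : j ∈ List.take (t - ((List.range m).filter p).length) [m] ↔
          j = m ∧ (List.range m).countP p < t := by
        by_cases hpos : 0 < t - ((List.range m).filter p).length
        · rw [List.take_of_length_le (by simp; omega)]
          simp
          intro _
          omega
        · have : t - ((List.range m).filter p).length = 0 := by omega
          rw [this]
          simp
          intro h
          omega
      rw [hsingle, ih]
      by_cases hjm : j = m
      · subst hjm
        simp [hp]
        try omega
      · have hcj : j < m + 1 ↔ j < m := by omega
        simp [hjm, hcj]
    · have hfm : List.filter p [m] = [] := by simp [hp]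
      rw [hfm]
      simp only [List.take_nil, List.not_mem_nil, or_false]
      rw [ih]
      by_cases hjm : j = m
      · subst hjm
        simp [hp]
      · have hcj : j < m + 1 ↔ j < m := by omega
        simp [hcj]

theorem pvCond_lt (cs : List Char) (j : ℕ) (h : pvCond cs j = true) : j + 1 < cs.length := by
  unfold pvCond at h
  simp only [Bool.and_eq_true, decide_eq_true_eq] at h
  omega

theorem pvCountTail (cs : List Char) :
    (List.range cs.length).countP (pvCond cs) = (List.range (cs.length - 1)).countP (pvCond cs) := by
  rcases Nat.eq_zero_or_pos cs.length with h | h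
  · rw [h]
  · have : cs.length = (cs.length - 1) + 1 := by omega
    rw [this, List.range_succ, List.countP_append]
    have hc : pvCond cs (cs.length - 1) = false := by
      unfold pvCond
      have : ¬ (((cs.length - 1 : ℕ) : Int) < (cs.length : Int) - 1) := by omega
      simp [this]
    simp [hc]

theorem pvRank_lt (cs : List Char) (j : ℕ) (h : pvCond cs j = true) :
    (List.range j).countP (pvCond cs) < ((List.range (cs.length - 1)).filter (pvCond cs)).length := by
  rw [← List.countP_eq_length_filter]
  have hj : j + 1 ≤ cs.length - 1 := by have := pvCond_lt cs j h; omega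
  calc (List.range j).countP (pvCond cs) < (List.range (j+1)).countP (pvCond cs) := by
        rw [List.range_succ, List.countP_append]; simp [h]
    _ ≤ (List.range (cs.length - 1)).countP (pvCond cs) :=
        ((List.range_sublist.mpr hj).countP_le)

-- B's candidate list is the mapped filtered range
theorem pvCands (cs : List Char) :
    ((PySem.List.pyRange 0 ((cs.length : Int) - 1) 1).filter (fun i =>
      (PySem.List.pyGet? cs i == some '-') &&
      ((PySem.List.pyGet? cs (i - 1)).any fun c => "haeiou,;.:".toList.contains c) &&
      ((PySem.List.pyGet? cs (i + 1)).any fun c => "aeiouh".toList.contains c)))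
    = ((List.range (cs.length - 1)).filter (pvCond cs)).map (fun j : ℕ => (j : Int)) := by
  rw [PySem.List.pyRange_one]
  have hT : ((cs.length : Int) - 1 - 0).toNat = cs.length - 1 := by omega
  rw [hT]
  rw [List.filter_map]
  simp only [Function.comp_def, zero_add]
  have hc : ∀ j ∈ List.range (cs.length - 1),
      ((PySem.List.pyGet? cs (j : Int) == some '-') &&
       ((PySem.List.pyGet? cs ((j : Int) - 1)).any fun c => "haeiou,;.:".toList.contains c) &&
       ((PySem.List.pyGet? cs ((j : Int) + 1)).any fun c => "aeiouh".toList.contains c))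
      = pvCond cs j := by
    intro j hj
    have hjm : j < cs.length - 1 := List.mem_range.mp hj
    unfold pvCond
    have h1 : ((j : Int) < (cs.length : Int) - 1) := by omega
    simp [h1]
  rw [List.filter_congr hc]

theorem pvMain (verso : String) (k : Int) :
    sineresisAtonas verso k = sineresisAtonas_alt verso k := by
  have hcnt0 : ∀ b, pvCnt verso.toList 0 b = (List.range b).countP (pvCond verso.toList) := by
    intro b
    simp [pvCnt, ← List.range_eq_range']
  have hA := pvFoldA verso.toList 0 (Nat.zero_le _) [] k
  simp only [List.drop_zero, Nat.cast_zero, List.nil_append, Nat.sub_zero] at hA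
  set cs := verso.toList with hcs
  set C := (List.range (cs.length - 1)).filter (pvCond cs) with hC
  have hlenC : C.length = (List.range (cs.length - 1)).countP (pvCond cs) := by
    rw [hC, ← List.countP_eq_length_filter]
  -- the Int takes agree
  have htake : (if k > 0 then min ((C.length : ℕ) : Int) k else 0)
      = (if 0 < k then min ((pvCnt cs 0 cs.length : ℕ) : Int) k else 0) := by
    rw [hcnt0, pvCountTail, ← hlenC]
  have htakeNat : 0 ≤ (if k > 0 then min ((C.length : ℕ) : Int) k else 0) := by
    split_ifs with h
    · positivity
    · exact le_refl 0
  simp only [sineresisAtonas, sineresisAtonas_alt, pvCands, List.length_map]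
  rw [hA]
  refine Prod.ext ?_ ?_
  · -- string components
    show String.ofList _ = String.ofList _
    congr 1
    rw [PySem.List.slice_to _ htakeNat]
    rw [PySem.List.enumerate_eq_map_pyRange _ ' ', List.map_map, PySem.List.pyRange_one]
    simp only [PySem.List.len_eq, sub_zero, zero_add, Int.toNat_natCast, Function.comp_def,
      PySem.List.pyGetD_natCast, ← List.range_eq_range', ← hcs]
    rw [List.map_map]
    apply List.map_congr_left
    intro j hj
    have hjlen : j < cs.length := List.mem_range.mp hj
    simp only [Function.comp_def, PySem.List.pyGetD_natCast, ← List.map_take]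
    have hmem : (List.map (fun i : ℕ => (i : Int))
        (List.take (if k > 0 then min ((C.length : ℕ) : Int) k else 0).toNat C)).contains (j : Int)
        = (pvCond cs j && decide ((pvCnt cs 0 j : Int) < k)) := by
      rw [hcnt0]
      by_cases hk : k > 0
      · have htN : (if k > 0 then min ((C.length : ℕ) : Int) k else 0).toNat
            = min C.length k.toNat := by
          simp only [hk, if_true]
          omega
        rw [htN]
        rw [Bool.eq_iff_iff]
        simp only [List.contains_iff_mem, List.mem_map, Bool.and_eq_true, decide_eq_true_eq,
          Nat.cast_inj]
        constructor
        · rintro ⟨a, ha, rfl⟩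
          obtain ⟨h1, h2, h3⟩ := (pvTakeFilterRange (pvCond cs) (cs.length - 1) _ a).mp ha
          refine ⟨h2, ?_⟩
          omega
        · rintro ⟨hcond, hlt⟩
          refine ⟨j, (pvTakeFilterRange (pvCond cs) (cs.length - 1) _ j).mpr ⟨?_, hcond, ?_⟩, rfl⟩
          · have := pvCond_lt cs j hcond
            omega
          · have h1 := pvRank_lt cs j hcond
            rw [← hC] at h1
            omega
      · have h0 : ¬ ((List.countP (pvCond cs) (List.range j) : Int) < k) := by
          have := Int.natCast_nonneg (List.countP (pvCond cs) (List.range j))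
          omega
        simp [hk, h0]
    rw [hmem]
  · -- residual components
    show _ = k - _
    rw [htake]

-- ===== VERDICT (by name: the statement is the Claim_ definition above) =====
theorem sineresisAtonas_spec : Claim_equal_sineresisAtonas := by
  intro verso k _
  unfold Spec_sineresisAtonas
  exact pvMain verso k
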